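-- pv_equiv track=rewrite | github.com/generalaimodels/distributed-training | scripts/normalize_asset_paths.py | split_query_fragment
-- ===== SOURCE A (Python) =====
-- def split_query_fragment(value: str) -> tuple[str, str]:
--     query_index = value.find("?")
--     fragment_index = value.find("#")
--     indices = [index for index in (query_index, fragment_index) if index >= 0]
--     if not indices:
--         return value, ""
--     split_at = min(indices)
--     return value[:split_at], value[split_at:]
-- ===== SOURCE B (Python) =====
-- def split_query_fragment(value: str) -> tuple[str, str]:
--     for i, ch in enumerate(value):
--         if ch == '?' or ch == '#':
--             return value[:i], value[i:]
--     return value, ""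
-- ===== Notes on version B (the rewrite author's own statement) =====
-- stated objective: simpler
-- what changed: Replaces the two full find scans plus a filtered min over the surviving indices with a single early-stopping left-to-right scan that splits at the first delimiter character.
import Mathlib
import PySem

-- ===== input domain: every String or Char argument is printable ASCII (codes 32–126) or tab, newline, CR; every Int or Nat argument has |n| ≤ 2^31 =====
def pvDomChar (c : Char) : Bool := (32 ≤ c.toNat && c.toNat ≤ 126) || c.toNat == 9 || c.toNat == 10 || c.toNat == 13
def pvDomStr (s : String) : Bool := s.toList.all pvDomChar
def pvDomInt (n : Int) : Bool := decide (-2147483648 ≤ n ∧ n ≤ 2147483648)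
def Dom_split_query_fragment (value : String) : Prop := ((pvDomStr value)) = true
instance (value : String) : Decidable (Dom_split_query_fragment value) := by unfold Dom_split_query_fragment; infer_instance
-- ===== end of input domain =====

-- B replaces A's two full `find` scans plus a filtered min with one early-stopping
-- left-to-right scan that splits at the first '?' or '#'; same O(n) cost, simpler.

-- ===== PORT A =====
def split_query_fragment (value : String) : String × String :=
  let query_index := PySem.Str.find value "?"
  let fragment_index := PySem.Str.find value "#"
  let indices := [query_index, fragment_index].filter (fun index => decide (0 ≤ index))
  -- Python's `min` raises only on an empty list; `if not indices: return value, ""` is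
  -- exactly the `none` branch of `min?`.
  match PySem.List.min? indices (fun i => i) with
  | none => (value, "")
  | some split_at =>
      (PySem.Str.slice value none (some split_at), PySem.Str.slice value (some split_at) none)

-- ===== PORT B =====
-- the `for i, ch in enumerate(value)` loop: recursion over the remaining characters,
-- carrying the current index i; on a delimiter it returns the two slices at i.
def sqfGo (value : String) : List Char → Nat → String × String
  | [], _ => (value, "")
  | ch :: rest, i =>
      if ch = '?' ∨ ch = '#' then
        (PySem.Str.slice value none (some (i : Int)), PySem.Str.slice value (some (i : Int)) none)
      else sqfGo value rest (i + 1)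

def split_query_fragment_alt (value : String) : String × String :=
  sqfGo value value.toList 0

-- ===== PRECONDITION & SPEC =====
def Spec_split_query_fragment (value : String) (out : String × String) : Prop := out = split_query_fragment_alt value
instance (value : String) (out : String × String) : Decidable (Spec_split_query_fragment value out) := by unfold Spec_split_query_fragment; infer_instance

-- ===== CLAIM (what is proved, stated in full; the proofs are below) =====
def Claim_equal_split_query_fragment : Prop := ∀ (value : String), Dom_split_query_fragment value → Spec_split_query_fragment value (split_query_fragment value)

-- ===== LEMMAS AND PROOFS =====

def sqfDelim (c : Char) : Bool := c == '?' || c == '#'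

theorem sqf_prefix_singleton {c : Char} {xs : List Char} : [c] <+: xs ↔ xs.head? = some c := by
  constructor
  · rintro ⟨t, rfl⟩; rfl
  · intro h
    cases xs with
    | nil => simp at h
    | cons a t => simp at h; exact ⟨t, by simp [h]⟩

theorem sqf_find_cons (a c : Char) (l : List Char) :
    PySem.Chars.find (a :: l) [c] =
      if a = c then 0
      else (if PySem.Chars.find l [c] = -1 then -1 else PySem.Chars.find l [c] + 1) := by
  by_cases hac : a = c
  · subst hac
    have hnn : 0 ≤ PySem.Chars.find (a :: l) [a] :=
      (PySem.Chars.find_nonneg_iff _ _).mpr ((List.singleton_infix_iff a _).mpr (by simp))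
    obtain ⟨hpre, hmin⟩ := PySem.Chars.find_spec hnn
    have h0 : (PySem.Chars.find (a :: l) [a]).toNat = 0 := by
      by_contra h0
      exact hmin 0 (Nat.pos_of_ne_zero h0) ⟨l, rfl⟩
    rw [if_pos rfl]
    omega
  · rw [if_neg hac]
    by_cases hc : c ∈ l
    · have hr : 0 ≤ PySem.Chars.find l [c] :=
        (PySem.Chars.find_nonneg_iff _ _).mpr ((List.singleton_infix_iff c l).mpr hc)
      have hn : 0 ≤ PySem.Chars.find (a :: l) [c] :=
        (PySem.Chars.find_nonneg_iff _ _).mpr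
          ((List.singleton_infix_iff c _).mpr (List.mem_cons_of_mem a hc))
      obtain ⟨hpre1, hmin1⟩ := PySem.Chars.find_spec hn
      obtain ⟨hpre2, hmin2⟩ := PySem.Chars.find_spec hr
      have hn1 : 1 ≤ (PySem.Chars.find (a :: l) [c]).toNat := by
        by_contra h
        have h0 : (PySem.Chars.find (a :: l) [c]).toNat = 0 := by omega
        rw [h0, List.drop_zero] at hpre1
        have := sqf_prefix_singleton.mp hpre1
        simp at this
        exact hac this
      have hd1 : [c] <+: l.drop ((PySem.Chars.find (a :: l) [c]).toNat - 1) := by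
        have heq : (a :: l).drop (PySem.Chars.find (a :: l) [c]).toNat
            = l.drop ((PySem.Chars.find (a :: l) [c]).toNat - 1) := by
          obtain ⟨m, hm⟩ : ∃ m, (PySem.Chars.find (a :: l) [c]).toNat = m + 1 :=
            ⟨_, (Nat.succ_pred_eq_of_pos hn1).symm⟩
          rw [hm]; simp
        rwa [heq] at hpre1
      have hle1 : (PySem.Chars.find l [c]).toNat ≤ (PySem.Chars.find (a :: l) [c]).toNat - 1 := by
        by_contra h
        exact hmin2 _ (by omega) hd1
      have hd2 : [c] <+: (a :: l).drop ((PySem.Chars.find l [c]).toNat + 1) := by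
        simpa using hpre2
      have hle2 : (PySem.Chars.find (a :: l) [c]).toNat ≤ (PySem.Chars.find l [c]).toNat + 1 := by
        by_contra h
        exact hmin1 _ (by omega) hd2
      rw [if_neg (by omega)]
      omega
    · have h1 : PySem.Chars.find l [c] = -1 :=
        (PySem.Chars.find_eq_neg_one_iff _ _).mpr (by simpa [List.singleton_infix_iff] using hc)
      have h2 : PySem.Chars.find (a :: l) [c] = -1 :=
        (PySem.Chars.find_eq_neg_one_iff _ _).mpr (by
          simp [List.singleton_infix_iff]
          exact ⟨fun h => hac h.symm, hc⟩)
      simp [h1, h2]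

-- first-delimiter index: A's min-of-finds equals B's findIdx
theorem sqf_min2_nn (x y : Int) (hx : x < 0) (hy : y < 0) :
    PySem.List.min? (([x, y]).filter (fun i => decide (0 ≤ i))) (fun i => i) = none := by
  simp [List.filter, show ¬ (0 ≤ x) by omega, show ¬ (0 ≤ y) by omega]

theorem sqf_min2_pn (x y : Int) (hx : 0 ≤ x) (hy : y < 0) :
    PySem.List.min? (([x, y]).filter (fun i => decide (0 ≤ i))) (fun i => i) = some x := by
  simp [List.filter, hx, show ¬ (0 ≤ y) by omega, PySem.List.min?_id_cons]

theorem sqf_min2_np (x y : Int) (hx : x < 0) (hy : 0 ≤ y) :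
    PySem.List.min? (([x, y]).filter (fun i => decide (0 ≤ i))) (fun i => i) = some y := by
  simp [List.filter, hy, show ¬ (0 ≤ x) by omega, PySem.List.min?_id_cons]

theorem sqf_min2_pp (x y : Int) (hx : 0 ≤ x) (hy : 0 ≤ y) :
    PySem.List.min? (([x, y]).filter (fun i => decide (0 ≤ i))) (fun i => i) = some (min x y) := by
  simp [List.filter, hx, hy, PySem.List.min?_id_cons]

theorem sqf_min_eq_findIdx (l : List Char) :
    PySem.List.min?
      (([PySem.Chars.find l ['?'], PySem.Chars.find l ['#']]).filter (fun i => decide (0 ≤ i)))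
      (fun i => i) =
    (if l.findIdx sqfDelim < l.length then some ((l.findIdx sqfDelim : Nat) : Int) else none) := by
  induction l with
  | nil => decide
  | cons a l ih =>
      have hq1 := PySem.Chars.neg_one_le_find l ['?']
      have hf1 := PySem.Chars.neg_one_le_find l ['#']
      have hkle := List.findIdx_le_length (p := sqfDelim) (xs := l)
      rw [sqf_find_cons a '?' l, sqf_find_cons a '#' l, List.findIdx_cons]
      by_cases hq : a = '?'
      · have hb : sqfDelim a = true := by simp [sqfDelim, hq]
        have hne : a ≠ '#' := by rw [hq]; decide
        rw [if_pos hq, if_neg hne, hb, cond_true]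
        by_cases hf' : PySem.Chars.find l ['#'] = -1
        · rw [if_pos hf', sqf_min2_pn 0 (-1) (by omega) (by omega)]
          simp
        · rw [if_neg hf', sqf_min2_pp 0 (PySem.Chars.find l ['#'] + 1) (by omega) (by omega)]
          simp
          omega
      · by_cases hfch : a = '#'
        · have hb : sqfDelim a = true := by simp [sqfDelim, hfch]
          rw [if_neg hq, if_pos hfch, hb, cond_true]
          by_cases hq' : PySem.Chars.find l ['?'] = -1
          · rw [if_pos hq', sqf_min2_np (-1) 0 (by omega) (by omega)]
            simp
          · rw [if_neg hq', sqf_min2_pp (PySem.Chars.find l ['?'] + 1) 0 (by omega) (by omega)]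
            simp
            omega
        · have hb : sqfDelim a = false := by
            simp [sqfDelim]
            exact ⟨hq, hfch⟩
          rw [if_neg hq, if_neg hfch, hb, cond_false]
          by_cases hk : List.findIdx sqfDelim l < l.length
          · rw [if_pos hk] at ih
            rw [List.length_cons, if_pos (show List.findIdx sqfDelim l + 1 < l.length + 1 by omega)]
            by_cases hq' : PySem.Chars.find l ['?'] = -1
            · by_cases hf' : PySem.Chars.find l ['#'] = -1
              · rw [hq', hf', sqf_min2_nn _ _ (by omega) (by omega)] at ih
                exact absurd ih (by simp)
              · have hih := ih
                rw [hq', sqf_min2_np _ _ (by omega) (by omega)] at hih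
                rw [if_pos hq', if_neg hf',
                    sqf_min2_np (-1) (PySem.Chars.find l ['#'] + 1) (by omega) (by omega)]
                simp at hih ⊢
                omega
            · by_cases hf' : PySem.Chars.find l ['#'] = -1
              · have hih := ih
                rw [hf', sqf_min2_pn _ _ (by omega) (by omega)] at hih
                rw [if_neg hq', if_pos hf',
                    sqf_min2_pn (PySem.Chars.find l ['?'] + 1) (-1) (by omega) (by omega)]
                simp at hih ⊢
                omega
              · have hih := ih
                rw [sqf_min2_pp _ _ (by omega) (by omega)] at hih
                rw [if_neg hq', if_neg hf',
                    sqf_min2_pp (PySem.Chars.find l ['?'] + 1) (PySem.Chars.find l ['#'] + 1) (by omega) (by omega)]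
                simp at hih ⊢
                omega
          · rw [if_neg hk] at ih
            rw [List.length_cons, if_neg (show ¬ (List.findIdx sqfDelim l + 1 < l.length + 1) by omega)]
            by_cases hq' : PySem.Chars.find l ['?'] = -1
            · by_cases hf' : PySem.Chars.find l ['#'] = -1
              · rw [if_pos hq', if_pos hf', sqf_min2_nn (-1) (-1) (by omega) (by omega)]
              · have hih := ih
                rw [hq', sqf_min2_np _ _ (by omega) (by omega)] at hih
                exact absurd hih (by simp)
            · have hih := ih
              rcases lt_or_ge (PySem.Chars.find l ['#']) 0 with hfneg | hfpos
              · rw [sqf_min2_pn _ _ (by omega) (by omega)] at hih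
                exact absurd hih (by simp)
              · rw [sqf_min2_pp _ _ (by omega) (by omega)] at hih
                exact absurd hih (by simp)

theorem sqfGo_spec (value : String) (l : List Char) (i : Nat) :
    sqfGo value l i =
      if l.findIdx sqfDelim < l.length then
        (PySem.Str.slice value none (some ((i + l.findIdx sqfDelim : Nat) : Int)),
         PySem.Str.slice value (some ((i + l.findIdx sqfDelim : Nat) : Int)) none)
      else (value, "") := by
  induction l generalizing i with
  | nil => simp [sqfGo]
  | cons ch rest ih =>
      by_cases hd : ch = '?' ∨ ch = '#'
      · have hb : sqfDelim ch = true := by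
          rcases hd with h | h <;> simp [sqfDelim, h]
        simp [sqfGo, hd, List.findIdx_cons, hb]
      · have hb : sqfDelim ch = false := by
          simp [sqfDelim]
          exact ⟨fun h => hd (Or.inl h), fun h => hd (Or.inr h)⟩
        rw [sqfGo, if_neg hd, ih]
        simp only [List.findIdx_cons, hb, cond_false, List.length_cons]
        by_cases hk : List.findIdx sqfDelim rest < rest.length
        · rw [if_pos hk, if_pos (by omega)]
          have : i + 1 + List.findIdx sqfDelim rest = i + (List.findIdx sqfDelim rest + 1) := by omega
          rw [this]
        · rw [if_neg hk, if_neg (by omega)]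

-- ===== VERDICT (by name: the statement is the Claim_ definition above) =====
theorem split_query_fragment_spec : Claim_equal_split_query_fragment := by
  intro value _
  unfold Spec_split_query_fragment split_query_fragment split_query_fragment_alt
  have hq : PySem.Str.find value "?" = PySem.Chars.find value.toList ['?'] := by
    simp [PySem.Str.find_eq]
  have hf : PySem.Str.find value "#" = PySem.Chars.find value.toList ['#'] := by
    simp [PySem.Str.find_eq]
  dsimp only
  rw [hq, hf, sqf_min_eq_findIdx, sqfGo_spec]
  by_cases h : List.findIdx sqfDelim value.toList < value.length
  · simp [h]
  · simp [h]
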